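-- pv_equiv track=rewrite | github.com/selner/notepublisher | exportnote.py | scrubPathPart
-- ===== SOURCE A (Python) =====
-- def scrubPathPart(pathpart, lowercase=False):
--     assert (pathpart)
--
--     for c in r'[]/\;,><&*:%=+@!#^()|?^':
--         pathpart = pathpart.replace(c, u'')
--
--     pathpart = pathpart.replace(u' ', u'_')
--
--     if lowercase:
--         pathpart = pathpart.lower()
--
--     return pathpart
-- ===== SOURCE B (Python) =====
-- _PUNCT = r'[]/\;,><&*:%=+@!#^()|?^'
--
--
-- def scrubPathPart(pathpart, lowercase=False):
--     assert (pathpart)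
--
--     out = []
--     for ch in pathpart:
--         if ch in _PUNCT:
--             continue
--         if ch == ' ':
--             out.append('_')
--         elif lowercase:
--             out.append(ch.lower())
--         else:
--             out.append(ch)
--     return ''.join(out)
-- ===== Notes on version B (the rewrite author's own statement) =====
-- stated objective: alternative
-- what changed: Replaces ~24 repeated full-string replace passes plus a final lower() pass with a single explicit loop over the characters that skips punctuation, maps space to underscore and lowercases each kept character inline while appending to an accumulator.
import Mathlib
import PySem

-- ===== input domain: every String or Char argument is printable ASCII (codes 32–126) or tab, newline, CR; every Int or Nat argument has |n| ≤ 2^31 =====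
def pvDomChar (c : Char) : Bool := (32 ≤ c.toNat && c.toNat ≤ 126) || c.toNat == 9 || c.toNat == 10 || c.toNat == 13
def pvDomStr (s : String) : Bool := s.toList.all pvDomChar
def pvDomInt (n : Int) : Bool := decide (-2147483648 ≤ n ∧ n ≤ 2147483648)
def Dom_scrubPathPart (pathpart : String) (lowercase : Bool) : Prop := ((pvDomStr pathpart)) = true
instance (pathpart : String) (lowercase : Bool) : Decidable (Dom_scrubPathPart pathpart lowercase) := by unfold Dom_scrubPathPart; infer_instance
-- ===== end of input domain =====

-- B replaces A's ~24 repeated full-string replace passes and final lower() pass with one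
-- explicit accumulator loop that skips punctuation, maps space to '_' and lowercases inline
-- (objective: alternative single-pass algorithm; no speed claim).
-- ===== PORT A =====
-- the characters of the raw string r'[]/\;,><&*:%=+@!#^()|?^'
def pvPunctA : List Char := ['[', ']', '/', '\\', ';', ',', '>', '<', '&', '*', ':', '%', '=', '+', '@', '!', '#', '^', '(', ')', '|', '?', '^']

def scrubPathPart (pathpart : String) (lowercase : Bool) : String :=
  -- for c in r'…': pathpart = pathpart.replace(c, '')
  let s1 := pvPunctA.foldl (fun acc c => PySem.Str.replace acc (String.ofList [c]) "") pathpart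
  -- pathpart = pathpart.replace(' ', '_')
  let s2 := PySem.Str.replace s1 " " "_"
  if lowercase then PySem.Str.lower s2 else s2

-- ===== PORT B =====
-- _PUNCT = r'[]/\;,><&*:%=+@!#^()|?^'  (kept as a string; 'ch in _PUNCT' is a substring test)
def pvPunctStr : String := "[]/\\;,><&*:%=+@!#^()|?^"

-- out = []; for ch in pathpart: skip / append '_' / append ch.lower() / append ch; ''.join(out)
def scrubPathPart_alt (pathpart : String) (lowercase : Bool) : String :=
  let out := pathpart.toList.foldl
    (fun acc ch =>
      if PySem.Str.isIn (String.ofList [ch]) pvPunctStr then acc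
      else if ch = ' ' then acc ++ ['_']
      else if lowercase then acc ++ [PySem.Chars.lowerChar ch]
      else acc ++ [ch]) []
  String.ofList out

-- ===== PRECONDITION & SPEC =====
-- Pre_ excludes only the empty string, on which both A and B raise AssertionError at their leading assert.
def Pre_scrubPathPart (pathpart : String) (lowercase : Bool) : Prop := pathpart ≠ ""
instance (pathpart : String) (lowercase : Bool) : Decidable (Pre_scrubPathPart pathpart lowercase) := by unfold Pre_scrubPathPart; infer_instance
def pvWitness_scrubPathPart : String × Bool := ("A b/c!", true)

def Spec_scrubPathPart (pathpart : String) (lowercase : Bool) (out : String) : Prop := out = scrubPathPart_alt pathpart lowercase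
instance (pathpart : String) (lowercase : Bool) (out : String) : Decidable (Spec_scrubPathPart pathpart lowercase out) := by unfold Spec_scrubPathPart; infer_instance

-- ===== CLAIM (what is proved, stated in full; the proofs are below) =====
def Claim_equal_scrubPathPart : Prop := ∀ (pathpart : String) (lowercase : Bool), Dom_scrubPathPart pathpart lowercase → Pre_scrubPathPart pathpart lowercase → Spec_scrubPathPart pathpart lowercase (scrubPathPart pathpart lowercase)

-- ===== LEMMAS AND PROOFS =====

-- replace.go with a single-character pattern, given enough fuel, is a flatMap
theorem pv_replace_go_single (c : Char) (new : List Char) :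
    ∀ (fuel : Nat) (l acc : List Char), l.length ≤ fuel →
      PySem.Chars.replace.go [c] new fuel l acc
        = acc.reverse ++ l.flatMap (fun x => if x = c then new else [x]) := by
  intro fuel
  induction fuel with
  | zero =>
    intro l acc h
    have : l = [] := List.eq_nil_of_length_eq_zero (Nat.le_zero.mp h)
    subst this
    simp [PySem.Chars.replace.go]
  | succ n ih =>
    intro l acc h
    cases l with
    | nil => simp [PySem.Chars.replace.go]
    | cons x t =>
      by_cases hx : x = c
      · subst hx
        have hpre : List.isPrefixOf [x] (x :: t) = true := by
          simp [List.isPrefixOf]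
        simp only [PySem.Chars.replace.go, hpre, if_true]
        have hdrop : List.drop [x].length (x :: t) = t := by simp
        rw [hdrop, ih t (new.reverse ++ acc) (by simpa using Nat.succ_le_succ_iff.mp h)]
        simp
      · have hpre : List.isPrefixOf [c] (x :: t) = false := by
          simp [List.isPrefixOf]
          exact fun hcx => absurd hcx.symm hx
        simp only [PySem.Chars.replace.go, hpre]
        rw [ih t (x :: acc) (by simpa using Nat.succ_le_succ_iff.mp h)]
        simp [hx]

theorem pv_replace_single (l : List Char) (c : Char) (new : List Char) :
    PySem.Chars.replace l [c] new = l.flatMap (fun x => if x = c then new else [x]) := by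
  simp [PySem.Chars.replace, pv_replace_go_single c new l.length l [] (le_refl _)]

theorem pv_delete_eq_filter (l : List Char) (c : Char) :
    PySem.Chars.replace l [c] [] = l.filter (fun x => x ≠ c) := by
  rw [pv_replace_single]
  induction l with
  | nil => rfl
  | cons x t ih =>
    by_cases hx : x = c <;> simp [hx, ih]

theorem pv_space_eq_map (l : List Char) :
    PySem.Chars.replace l [' '] ['_'] = l.map (fun x => if x = ' ' then '_' else x) := by
  rw [pv_replace_single]
  induction l with
  | nil => rfl
  | cons x t ih =>
    by_cases hx : x = ' ' <;> simp [hx, ih]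

-- A's fold of per-character deletes over ps equals one filter against ps
theorem pv_fold_delete (ps : List Char) :
    ∀ (s : String),
      ps.foldl (fun acc c => PySem.Str.replace acc (String.ofList [c]) "") s
        = String.ofList (s.toList.filter (fun x => !(ps.contains x))) := by
  induction ps with
  | nil => intro s; simp
  | cons c t ih =>
    intro s
    simp only [List.foldl_cons]
    rw [ih]
    have hstep : PySem.Str.replace s (String.ofList [c]) ""
        = String.ofList (s.toList.filter (fun x => x ≠ c)) := by
      simp [PySem.Str.replace, pv_delete_eq_filter]
    rw [hstep]
    congr 1
    simp only [String.toList_ofList, List.filter_filter]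
    apply List.filter_congr
    intro x _
    by_cases hx : x = c <;> simp [hx]

theorem pv_space_str (l : List Char) :
    PySem.Str.replace (String.ofList l) " " "_"
      = String.ofList (l.map (fun x => if x = ' ' then '_' else x)) := by
  simp only [PySem.Str.replace, String.toList_ofList]
  have h1 : (" " : String).toList = [' '] := rfl
  have h2 : ("_" : String).toList = ['_'] := rfl
  rw [h1, h2, pv_space_eq_map]

-- B's substring membership test of a single character equals list membership in pvPunctA
theorem pv_isIn_single (ch : Char) :
    PySem.Str.isIn (String.ofList [ch]) pvPunctStr = pvPunctA.contains ch := by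
  have hlist : pvPunctStr.toList = pvPunctA := by decide
  by_cases h : ch ∈ pvPunctA
  · have hm : ch ∈ pvPunctStr.toList := by rw [hlist]; exact h
    obtain ⟨s, t, hst⟩ := List.append_of_mem hm
    have hinf : (String.ofList [ch]).toList <:+: pvPunctStr.toList := by
      rw [hst]; exact ⟨s, t, by simp⟩
    rw [(PySem.Str.isIn_iff_infix _ _).mpr hinf]
    simp [h]
  · have hfalse : PySem.Str.isIn (String.ofList [ch]) pvPunctStr = false := by
      cases hb : PySem.Str.isIn (String.ofList [ch]) pvPunctStr with
      | false => rfl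
      | true =>
        have hinf := (PySem.Str.isIn_iff_infix _ _).mp hb
        have hchm : ch ∈ pvPunctStr.toList := hinf.subset (by simp)
        rw [hlist] at hchm
        exact absurd hchm h
    rw [hfalse]
    simp [h]

-- the per-character transform B applies to kept characters
def pvKeep (lowercase : Bool) (ch : Char) : Char :=
  if ch = ' ' then '_' else if lowercase then PySem.Chars.lowerChar ch else ch

-- B's accumulator loop computes filter-then-map (invariant over the accumulator)
theorem pv_fold_alt (lowercase : Bool) :
    ∀ (l acc : List Char),
      l.foldl (fun acc ch =>
        if PySem.Str.isIn (String.ofList [ch]) pvPunctStr then acc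
        else if ch = ' ' then acc ++ ['_']
        else if lowercase then acc ++ [PySem.Chars.lowerChar ch]
        else acc ++ [ch]) acc
      = acc ++ (l.filter (fun x => !(pvPunctA.contains x))).map (pvKeep lowercase) := by
  intro l
  induction l with
  | nil => intro acc; simp
  | cons x t ih =>
    intro acc
    simp only [List.foldl_cons, pv_isIn_single x]
    by_cases hp : pvPunctA.contains x = true
    · rw [if_pos hp, ih]
      have hneg : (!pvPunctA.contains x) = false := by rw [hp]; rfl
      rw [List.filter_cons, hneg]
      simp
    · have hp' : pvPunctA.contains x = false := by
        cases hb : pvPunctA.contains x with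
        | false => rfl
        | true => exact absurd hb hp
      rw [if_neg hp]
      have hfc : List.filter (fun x => !(pvPunctA.contains x)) (x :: t)
          = x :: List.filter (fun x => !(pvPunctA.contains x)) t := by
        rw [List.filter_cons, hp']
        simp
      by_cases hs : x = ' '
      · subst hs
        rw [if_pos rfl, ih, hfc]
        simp [pvKeep]
      · rw [if_neg hs]
        cases lowercase with
        | false =>
          rw [if_neg (by simp), ih, hfc]
          simp [pvKeep, hs]
        | true =>
          rw [if_pos rfl, ih, hfc]
          simp [pvKeep, hs]

-- lowering after the space map equals B's inline per-character transform (lowerChar '_' = '_')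
theorem pv_lower_keep (l : List Char) :
    PySem.Chars.lower (l.map (fun x => if x = ' ' then '_' else x)) = l.map (pvKeep true) := by
  simp only [PySem.Chars.lower, List.map_map]
  apply List.map_congr_left
  intro x _
  by_cases hx : x = ' '
  · subst hx; decide
  · simp [pvKeep, hx]

-- A's space map is pvKeep false
theorem pv_keep_false : pvKeep false = (fun x => if x = ' ' then '_' else x) := by
  funext x
  simp [pvKeep]

-- ===== VERDICT (by name: the statement is the Claim_ definition above) =====
theorem scrubPathPart_spec : Claim_equal_scrubPathPart := by
  intro pathpart lowercase _ _
  show scrubPathPart pathpart lowercase = scrubPathPart_alt pathpart lowercase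
  rw [scrubPathPart, scrubPathPart_alt]
  rw [pv_fold_delete, pv_space_str, pv_fold_alt]
  cases lowercase with
  | false =>
    rw [if_neg (by simp), pv_keep_false]
    simp
  | true =>
    rw [if_pos rfl, List.nil_append, ← pv_lower_keep]
    have hls : ∀ (m : List Char), PySem.Str.lower (String.ofList m) = String.ofList (PySem.Chars.lower m) := by
      intro m
      simp [PySem.Str.lower]
    exact hls _
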